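-- pv_equiv track=rewrite | github.com/BrunoASNascimento/hacker-rank-resolve | ArtificialIntelligence/bot_saves_princess.py | displayPathtoPrincess
-- ===== SOURCE A (Python) =====
-- def displayPathtoPrincess(n, grid):
--     p_position = None
--     m_position = None
--
--     # Find positions of 'm' and 'p' and break early when found
--     for i in range(n):
--         if 'm' in grid[i]:
--             m_position = (i, grid[i].index('m'))
--         if 'p' in grid[i]:
--             p_position = (i, grid[i].index('p'))
--         if m_position and p_position:
--             break
--
--     # Calculate horizontal and vertical distances
--     horizon = m_position[1] - p_position[1]
--     vertical = m_position[0] - p_position[0]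
--
--     # Generate moves list directly based on distances
--     moves = []
--     moves.extend(['LEFT'] * abs(horizon) if horizon >
--                  0 else ['RIGHT'] * abs(horizon))
--     moves.extend(['UP'] * abs(vertical) if vertical >
--                  0 else ['DOWN'] * abs(vertical))
--
--     return '\n'.join(moves)
-- ===== SOURCE B (Python) =====
-- def displayPathtoPrincess(n, grid):
--     p_position = None
--     m_position = None
--
--     for i in range(n):
--         if 'm' in grid[i]:
--             m_position = (i, grid[i].index('m'))
--         if 'p' in grid[i]:
--             p_position = (i, grid[i].index('p'))
--         if m_position and p_position:
--             break
--
--     r, c = m_position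
--     pr, pc = p_position
--
--     # Simulate the bot: walk the cursor horizontally first, then vertically.
--     moves = []
--     while c > pc:
--         moves.append('LEFT')
--         c -= 1
--     while c < pc:
--         moves.append('RIGHT')
--         c += 1
--     while r > pr:
--         moves.append('UP')
--         r -= 1
--     while r < pr:
--         moves.append('DOWN')
--         r += 1
--     return '\n'.join(moves)
-- ===== Notes on version B (the rewrite author's own statement) =====
-- stated objective: alternative
-- what changed: B keeps A's position scan but replaces A's closed-form abs-distance list-multiplication emission of moves with a step-by-step cursor simulation: four while loops move (r,c) from the bot toward the princess, appending one move per step.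
import Mathlib
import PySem

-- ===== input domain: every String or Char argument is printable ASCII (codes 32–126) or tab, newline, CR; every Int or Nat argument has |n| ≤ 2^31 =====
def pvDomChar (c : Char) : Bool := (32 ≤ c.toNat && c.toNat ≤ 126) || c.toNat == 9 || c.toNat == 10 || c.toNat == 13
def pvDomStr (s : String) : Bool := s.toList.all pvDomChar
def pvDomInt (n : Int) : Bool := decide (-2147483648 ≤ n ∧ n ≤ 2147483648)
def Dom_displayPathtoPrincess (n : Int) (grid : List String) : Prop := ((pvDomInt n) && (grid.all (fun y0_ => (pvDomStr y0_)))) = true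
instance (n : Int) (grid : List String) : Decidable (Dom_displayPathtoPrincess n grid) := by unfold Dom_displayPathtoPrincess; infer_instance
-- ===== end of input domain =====

-- B replaces A's abs-distance × list-multiplication move emission with a step-by-step cursor
-- simulation (four while loops); same position scan, same cost — objective: alternative.

-- ===== PORT A =====
-- shared scanner loop: "for i in range(n): … break" of both Pythons (identical code in A and B)
def pvFind (grid : List String) (n i : Int) (mo po : Option (Int × Int)) :
    Option (Int × Int) × Option (Int × Int) :=
  if i < n then
    match PySem.List.pyGet? grid i with
    | none => (mo, po)            -- Python raises IndexError here; excluded by Pre_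
    | some row =>
      let mo' := if PySem.Str.isIn "m" row then some (i, PySem.Str.find row "m") else mo
      let po' := if PySem.Str.isIn "p" row then some (i, PySem.Str.find row "p") else po
      if mo'.isSome && po'.isSome then (mo', po') else pvFind grid n (i + 1) mo' po'
  else (mo, po)
termination_by (n - i).toNat
decreasing_by omega

def displayPathtoPrincess (n : Int) (grid : List String) : String :=
  match pvFind grid n 0 none none with
  | (some m, some p) =>
      let horizon := m.2 - p.2
      let vertical := m.1 - p.1
      let moves :=
        (if horizon > 0 then List.replicate horizon.natAbs "LEFT"
         else List.replicate horizon.natAbs "RIGHT")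
        ++ (if vertical > 0 then List.replicate vertical.natAbs "UP"
            else List.replicate vertical.natAbs "DOWN")
      PySem.Str.join "\n" moves
  | _ => ""                        -- Python raises TypeError here; excluded by Pre_

-- ===== PORT B =====
-- B's own copy of the scanner loop (same code in Source B; kept separate from A's helper)
def pvFindB (grid : List String) (n i : Int) (mo po : Option (Int × Int)) :
    Option (Int × Int) × Option (Int × Int) :=
  if i < n then
    match PySem.List.pyGet? grid i with
    | none => (mo, po)            -- Python raises IndexError here; excluded by Pre_
    | some row =>
      let mo' := if PySem.Str.isIn "m" row then some (i, PySem.Str.find row "m") else mo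
      let po' := if PySem.Str.isIn "p" row then some (i, PySem.Str.find row "p") else po
      if mo'.isSome && po'.isSome then (mo', po') else pvFindB grid n (i + 1) mo' po'
  else (mo, po)
termination_by (n - i).toNat
decreasing_by omega

-- one 'while t < x: moves.append(w); x -= 1' loop: returns (appended moves, final cursor)
def pvWhileDec (w : String) (x t : Int) : List String × Int :=
  if t < x then
    let r := pvWhileDec w (x - 1) t
    (w :: r.1, r.2)
  else ([], x)
termination_by (x - t).toNat
decreasing_by omega

-- one 'while x < t: moves.append(w); x += 1' loop
def pvWhileInc (w : String) (x t : Int) : List String × Int :=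
  if x < t then
    let r := pvWhileInc w (x + 1) t
    (w :: r.1, r.2)
  else ([], x)
termination_by (t - x).toNat
decreasing_by omega

def displayPathtoPrincess_alt (n : Int) (grid : List String) : String :=
  let res := pvFindB grid n 0 none none
  match res.1 with
  | none => ""                     -- Python raises TypeError here; excluded by Pre_
  | some m =>
    match res.2 with
    | none => ""                   -- Python raises TypeError here; excluded by Pre_
    | some p =>
      let l := pvWhileDec "LEFT" m.2 p.2
      let rt := pvWhileInc "RIGHT" l.2 p.2
      let u := pvWhileDec "UP" m.1 p.1
      let d := pvWhileInc "DOWN" u.2 p.1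
      PySem.Str.join "\n" (l.1 ++ rt.1 ++ u.1 ++ d.1)

-- ===== PRECONDITION & SPEC =====
-- Pre_: exactly the inputs on which A returns — both 'm' and 'p' occur among the first
-- min(n, len(grid)) rows (otherwise A hits IndexError or subscripts None: TypeError).
def Pre_displayPathtoPrincess (n : Int) (grid : List String) : Prop :=
  ((grid.take n.toNat).any (fun row => PySem.Str.isIn "m" row) = true) ∧
  ((grid.take n.toNat).any (fun row => PySem.Str.isIn "p" row) = true)
instance (n : Int) (grid : List String) : Decidable (Pre_displayPathtoPrincess n grid) := by
  unfold Pre_displayPathtoPrincess; infer_instance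

def pvWitness_displayPathtoPrincess : Int × List String := (2, ["m-", "-p"])

def Spec_displayPathtoPrincess (n : Int) (grid : List String) (out : String) : Prop := out = displayPathtoPrincess_alt n grid
instance (n : Int) (grid : List String) (out : String) : Decidable (Spec_displayPathtoPrincess n grid out) := by unfold Spec_displayPathtoPrincess; infer_instance

-- ===== CLAIM (what is proved, stated in full; the proofs are below) =====
def Claim_equal_displayPathtoPrincess : Prop := ∀ (n : Int) (grid : List String), Dom_displayPathtoPrincess n grid → Pre_displayPathtoPrincess n grid → Spec_displayPathtoPrincess n grid (displayPathtoPrincess n grid)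

-- ===== LEMMAS AND PROOFS =====
theorem pvWhileDec_eq (w : String) (x t : Int) :
    pvWhileDec w x t = (List.replicate (x - t).toNat w, if t < x then t else x) := by
  fun_induction pvWhileDec w x t with
  | case1 x h r ih =>
      have hx : (x - t).toNat = (x - 1 - t).toNat + 1 := by omega
      have h2 : (if t < x - 1 then t else x - 1) = t := by split_ifs <;> omega
      have hr : r = (List.replicate (x - 1 - t).toNat w, if t < x - 1 then t else x - 1) := ih
      rw [hr]
      simp [hx, h2, if_pos h, List.replicate_succ]
  | case2 x h =>
      have hx : (x - t).toNat = 0 := by omega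
      simp [hx, h]

theorem pvWhileInc_eq (w : String) (x t : Int) :
    pvWhileInc w x t = (List.replicate (t - x).toNat w, if x < t then t else x) := by
  fun_induction pvWhileInc w x t with
  | case1 x h r ih =>
      have hx : (t - x).toNat = (t - (x + 1)).toNat + 1 := by omega
      have h2 : (if x + 1 < t then t else x + 1) = t := by split_ifs <;> omega
      have hr : r = (List.replicate (t - (x + 1)).toNat w, if x + 1 < t then t else x + 1) := ih
      rw [hr]
      simp [hx, h2, if_pos h, List.replicate_succ]
  | case2 x h =>
      have hx : (t - x).toNat = 0 := by omega
      simp [hx, h]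

-- the simulated pair of while loops emits exactly A's closed-form move block
theorem pvMoves_eq (w1 w2 : String) (c pc : Int) :
    (if c - pc > 0 then List.replicate (c - pc).natAbs w1
     else List.replicate (c - pc).natAbs w2)
      = (pvWhileDec w1 c pc).1 ++ (pvWhileInc w2 (pvWhileDec w1 c pc).2 pc).1 := by
  rw [pvWhileDec_eq, pvWhileInc_eq]
  by_cases h : pc < c
  · have h1 : c - pc > 0 := by omega
    have h2 : (c - pc).natAbs = (c - pc).toNat := by omega
    simp [h, h2]
  · have h1 : ¬ c - pc > 0 := by omega
    have h2 : (c - pc).natAbs = (pc - c).toNat := by omega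
    simp [h, h2]
    omega

-- the two (textually identical) scanner loops agree
theorem pvFindB_eq (grid : List String) (n i : Int)
    (mo po : Option (Int × Int)) : pvFindB grid n i mo po = pvFind grid n i mo po := by
  generalize hk : (n - i).toNat = k
  induction k generalizing i mo po with
  | zero =>
      have hlt : ¬ i < n := by omega
      rw [pvFind, if_neg hlt, pvFindB, if_neg hlt]
  | succ k ih =>
      by_cases hlt : i < n
      · rw [pvFind, if_pos hlt, pvFindB, if_pos hlt]
        cases PySem.List.pyGet? grid i with
        | none => rfl
        | some row =>
          exact ite_congr rfl (fun _ => rfl) (fun _ => ih (i + 1) _ _ (by omega))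
      · rw [pvFind, if_neg hlt, pvFindB, if_neg hlt]

theorem ports_eq (n : Int) (grid : List String) :
    displayPathtoPrincess n grid = displayPathtoPrincess_alt n grid := by
  unfold displayPathtoPrincess displayPathtoPrincess_alt
  rw [pvFindB_eq]
  rcases hf : pvFind grid n 0 none none with ⟨mo, po⟩
  cases mo with
  | none => cases po <;> simp
  | some m =>
    cases po with
    | none => simp
    | some p =>
      simp only []
      rw [← pvMoves_eq "LEFT" "RIGHT" m.2 p.2, List.append_assoc,
          ← pvMoves_eq "UP" "DOWN" m.1 p.1]

-- ===== VERDICT (by name: the statement is the Claim_ definition above) =====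
theorem displayPathtoPrincess_spec : Claim_equal_displayPathtoPrincess := by
  intro n grid _ _
  unfold Spec_displayPathtoPrincess
  exact ports_eq n grid
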